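-- pv_equiv track=rewrite | github.com/jessiedong01/Multi-Lingual-Morphologically-Compatible-Tokenizer | scripts/run_full_pipeline.py | _ensure_min_length
-- ===== SOURCE A (Python) =====
-- from typing import List, Tuple
--
-- def _ensure_min_length(seq: List[int], min_len: int) -> List[int]:
--     if len(seq) >= min_len or not seq:
--         return seq
--     out = list(seq)
--     while len(out) < min_len:
--         take = min(len(seq), min_len - len(out))
--         out.extend(seq[:take])
--     return out
-- ===== SOURCE B (Python) =====
-- from typing import List
--
-- def _ensure_min_length(seq: List[int], min_len: int) -> List[int]:
--     if len(seq) >= min_len or not seq: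
--         return seq
--     reps = -(-min_len // len(seq))  # ceiling division
--     return (seq * reps)[:min_len]
-- ===== Notes on version B (the rewrite author's own statement) =====
-- stated objective: idiomatic
-- what changed: Replaced the while-loop that repeatedly extends the output with bookkeeping of how much to take by a closed-form ceiling-division repeat count, list multiplication and one slice.
import Mathlib
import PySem

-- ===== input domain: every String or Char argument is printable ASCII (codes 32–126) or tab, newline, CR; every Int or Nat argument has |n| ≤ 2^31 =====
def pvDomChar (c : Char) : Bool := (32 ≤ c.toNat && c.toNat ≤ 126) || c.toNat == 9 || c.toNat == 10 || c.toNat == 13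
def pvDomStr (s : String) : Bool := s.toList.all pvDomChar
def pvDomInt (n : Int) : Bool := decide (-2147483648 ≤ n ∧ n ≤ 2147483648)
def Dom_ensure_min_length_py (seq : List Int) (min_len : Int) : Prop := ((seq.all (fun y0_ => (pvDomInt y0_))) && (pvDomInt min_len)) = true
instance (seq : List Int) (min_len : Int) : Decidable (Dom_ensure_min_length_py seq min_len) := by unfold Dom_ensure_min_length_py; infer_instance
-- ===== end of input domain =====

-- B replaces A's while-loop-with-take-accounting by a closed-form ceiling-division
-- repeat count, list multiplication and a single slice (idiomatic; same result).


-- ===== PORT A =====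
-- while len(out) < min_len: take = min(len(seq), min_len - len(out)); out.extend(seq[:take])
-- (the hypothesis hs : seq ≠ [] records that Python only reaches the loop with a
--  non-empty seq, which is what makes the loop terminate)
def ensureLoopA (seq : List Int) (min_len : Int) (hs : seq ≠ []) (out : List Int) : List Int :=
  if h : (out.length : Int) < min_len then
    let take := min (seq.length : Int) (min_len - out.length)
    ensureLoopA seq min_len hs (out ++ PySem.List.slice seq none (some take))
  else out
termination_by (min_len - out.length).toNat
decreasing_by
  have hn : 1 ≤ seq.length := List.length_pos_iff.mpr hs
  have ht : (0:Int) ≤ min (seq.length : Int) (min_len - out.length) := by omega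
  rw [PySem.List.slice_to seq ht]
  simp only [List.length_append, List.length_take]
  omega

def ensure_min_length_py (seq : List Int) (min_len : Int) : List Int :=
  if h : (seq.length : Int) ≥ min_len ∨ seq = [] then seq
  else ensureLoopA seq min_len (fun he => h (Or.inr he)) seq

-- ===== PORT B =====
-- reps = -(-min_len // len(seq));  return (seq * reps)[:min_len]
def ensure_min_length_py_alt (seq : List Int) (min_len : Int) : List Int :=
  if (seq.length : Int) ≥ min_len ∨ seq = [] then seq
  else
    let reps := -(PySem.Int.floordiv (-min_len) (seq.length : Int))
    PySem.List.slice ((List.replicate reps.toNat seq).flatten) none (some min_len)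

-- ===== PRECONDITION & SPEC =====
def Spec_ensure_min_length_py (seq : List Int) (min_len : Int) (out : List Int) : Prop := out = ensure_min_length_py_alt seq min_len
instance (seq : List Int) (min_len : Int) (out : List Int) : Decidable (Spec_ensure_min_length_py seq min_len out) := by unfold Spec_ensure_min_length_py; infer_instance

-- ===== CLAIM (what is proved, stated in full; the proofs are below) =====
def Claim_equal_ensure_min_length_py : Prop := ∀ (seq : List Int) (min_len : Int), Dom_ensure_min_length_py seq min_len → Spec_ensure_min_length_py seq min_len (ensure_min_length_py seq min_len)

-- ===== LEMMAS AND PROOFS =====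

-- take d of m concatenated copies of seq does not depend on m once m copies suffice
theorem flatten_replicate_length (seq : List Int) (m : Nat) :
    ((List.replicate m seq).flatten).length = m * seq.length := by
  induction m with
  | zero => simp
  | succ k ih => simp [List.replicate_succ, ih]; ring

theorem take_flatten_replicate_succ (seq : List Int) (m d : Nat) (hd : d ≤ m * seq.length) :
    ((List.replicate (m + 1) seq).flatten).take d = ((List.replicate m seq).flatten).take d := by
  rw [List.replicate_succ' , List.flatten_append,
    List.take_append_of_le_length (by rw [flatten_replicate_length]; exact hd)]

theorem take_flatten_replicate_add (seq : List Int) (m k d : Nat) (hd : d ≤ m * seq.length) :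
    ((List.replicate (m + k) seq).flatten).take d = ((List.replicate m seq).flatten).take d := by
  induction k with
  | zero => rfl
  | succ j ih =>
      rw [show m + (j + 1) = (m + j) + 1 from rfl, take_flatten_replicate_succ]
      · exact ih
      · calc d ≤ m * seq.length := hd
          _ ≤ (m + j) * seq.length := Nat.mul_le_mul_right _ (Nat.le_add_right _ _)

theorem take_flatten_replicate_indep (seq : List Int) (m m' d : Nat)
    (h : d ≤ m * seq.length) (h' : d ≤ m' * seq.length) :
    ((List.replicate m seq).flatten).take d = ((List.replicate m' seq).flatten).take d := by
  rcases Nat.le_total m m' with hle | hle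
  · rw [show m' = m + (m' - m) by omega, take_flatten_replicate_add seq m _ d h]
  · rw [show m = m' + (m - m') by omega, take_flatten_replicate_add seq m' _ d h']

-- `pad seq d` = the first d elements of seq repeated cyclically
def pad (seq : List Int) (d : Nat) : List Int := ((List.replicate d seq).flatten).take d

theorem pad_step (seq : List Int) (d : Nat) (hs : seq ≠ []) (hd : 1 ≤ d) :
    pad seq d = seq.take (min seq.length d) ++ pad seq (d - min seq.length d) := by
  have hn : 1 ≤ seq.length := List.length_pos_iff.mpr hs
  unfold pad
  rw [show d = (d - 1) + 1 by omega, List.replicate_succ, List.flatten_cons,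
    List.take_append]
  have h1 : seq.take ((d-1)+1) = seq.take (min seq.length ((d-1)+1)) := by
    rcases Nat.le_total seq.length ((d-1)+1) with h | h
    · rw [Nat.min_eq_left h, List.take_of_length_le h, List.take_length]
    · rw [Nat.min_eq_right h]
  rw [h1]
  congr 1
  set D := (d - 1) + 1 with hD
  rcases Nat.le_total seq.length D with h | h
  · -- D ≥ n : remainder D - n copies needed
    rw [Nat.min_eq_left h]
    refine take_flatten_replicate_indep seq (d - 1) (D - seq.length) (D - seq.length) ?_ ?_
    · exact le_trans (by omega) (Nat.le_mul_of_pos_right (d - 1) (by omega))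
    · exact Nat.le_mul_of_pos_right _ (by omega)
  · rw [Nat.min_eq_right h]
    have : D - seq.length = 0 := by omega
    simp [this]

theorem loopA_eq_pad_aux (seq : List Int) (min_len : Int) (hs : seq ≠ []) (k : Nat) :
    ∀ out : List Int, (min_len - out.length).toNat ≤ k →
      ensureLoopA seq min_len hs out = out ++ pad seq (min_len - out.length).toNat := by
  induction k with
  | zero =>
      intro out hk
      have h0 : ¬ ((out.length : Int) < min_len) := by omega
      rw [ensureLoopA, dif_neg h0]
      have : (min_len - out.length).toNat = 0 := by omega
      simp [this, pad]
  | succ j ih =>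
      intro out hk
      by_cases h : (out.length : Int) < min_len
      · have hn : 1 ≤ seq.length := List.length_pos_iff.mpr hs
        rw [ensureLoopA, dif_pos h]
        have ht : (0:Int) ≤ min (seq.length : Int) (min_len - out.length) := by omega
        show ensureLoopA seq min_len hs
            (out ++ PySem.List.slice seq none (some (min (seq.length : Int) (min_len - out.length))))
          = out ++ pad seq (min_len - out.length).toNat
        rw [PySem.List.slice_to seq ht]
        set D : Nat := (min_len - out.length).toNat with hD
        have htn : (min (seq.length : Int) (min_len - out.length)).toNat = min seq.length D := by
          omega
        rw [htn]
        have hlen : (out ++ seq.take (min seq.length D)).length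
            = out.length + min seq.length D := by
          simp only [List.length_append, List.length_take]; omega
        rw [ih _ (by rw [hlen]; omega)]
        rw [hlen, List.append_assoc]
        congr 1
        have hD' : (min_len - ((out.length + min seq.length D : Nat) : Int)).toNat
            = D - min seq.length D := by push_cast; omega
        rw [hD', ← pad_step seq D hs (by omega)]
      · rw [ensureLoopA, dif_neg h]
        have : (min_len - out.length).toNat = 0 := by omega
        simp [this, pad]

theorem loopA_eq_pad (seq : List Int) (min_len : Int) (hs : seq ≠ []) (out : List Int) :
    ensureLoopA seq min_len hs out = out ++ pad seq (min_len - out.length).toNat :=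
  loopA_eq_pad_aux seq min_len hs _ out le_rfl

-- ===== VERDICT (by name: the statement is the Claim_ definition above) =====
theorem ensure_min_length_py_spec : Claim_equal_ensure_min_length_py := by
  intro seq min_len _
  unfold Spec_ensure_min_length_py ensure_min_length_py ensure_min_length_py_alt
  by_cases h : (seq.length : Int) ≥ min_len ∨ seq = []
  · rw [dif_pos h, if_pos h]
  · rw [dif_neg h, if_neg h]
    have hs : seq ≠ [] := fun he => h (Or.inr he)
    have hn : 1 ≤ seq.length := List.length_pos_iff.mpr hs
    have hlt : (seq.length : Int) < min_len := by omega
    set n : Int := (seq.length : Int) with hnd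
    show ensureLoopA seq min_len _ seq
      = PySem.List.slice ((List.replicate (-(PySem.Int.floordiv (-min_len) n)).toNat seq).flatten)
          none (some min_len)
    set reps : Int := -(PySem.Int.floordiv (-min_len) n) with hreps
    have hq := PySem.Int.floordiv_mul_add_mod (-min_len) n
    have hr0 := PySem.Int.mod_nonneg (-min_len) (b := n) (by omega)
    have hrlt := PySem.Int.mod_lt (-min_len) (b := n) (by omega)
    have hge : min_len ≤ reps * n := by
      have : reps * n = PySem.Int.mod (-min_len) n + min_len := by rw [hreps]; ring_nf; linarith
      linarith
    have hrpos : 0 ≤ reps := by nlinarith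
    rw [loopA_eq_pad, PySem.List.slice_to _ (by omega)]
    have hcast : ((reps.toNat * seq.length : Nat) : Int) = reps * n := by
      push_cast [Int.toNat_of_nonneg hrpos]; rfl
    have hM : min_len.toNat ≤ reps.toNat * seq.length := by
      have h2 : (min_len.toNat : Int) ≤ ((reps.toNat * seq.length : Nat) : Int) := by
        rw [hcast]
        have h3 : (min_len.toNat : Int) = min_len := by omega
        rw [h3]; exact hge
      exact_mod_cast h2
    have hstep := pad_step seq min_len.toNat hs (by omega)
    have hmin : min seq.length min_len.toNat = seq.length := by omega
    rw [hmin, List.take_length] at hstep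
    have hind : ((List.replicate min_len.toNat seq).flatten).take min_len.toNat
        = ((List.replicate reps.toNat seq).flatten).take min_len.toNat :=
      take_flatten_replicate_indep seq _ _ _ (Nat.le_mul_of_pos_right _ (by omega)) hM
    have hD : (min_len - (seq.length:Int)).toNat = min_len.toNat - seq.length := by omega
    rw [hD]
    calc seq ++ pad seq (min_len.toNat - seq.length)
        = pad seq min_len.toNat := hstep.symm
      _ = ((List.replicate reps.toNat seq).flatten).take min_len.toNat := hind
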